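-- pv_equiv track=rewrite | github.com/Xander-Murray/adventofcode | 2025/9/Movie_Theater2.py | solve
-- ===== SOURCE A (Python) =====
-- from itertools import combinations, pairwise
--
-- def normalize_rect(p1, p2):
--     (x1, y1), (x2, y2) = p1, p2
--     left = min(x1, x2)
--     right = max(x1, x2)
--     bottom = min(y1, y2)
--     top = max(y1, y2)
--     return (left, bottom), (right, top)
--
-- def build_edge_boxes(points):
--     # close the polygon loop
--     loop = points + [points[0]]
--
--     edge_boxes = []
--     for p1, p2 in pairwise(loop):
--         edge_boxes.append(normalize_rect(p1, p2))
--     return edge_boxes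
--
-- def rect_area_inclusive(rect):
--     (x1, y1), (x2, y2) = rect
--     return (x2 - x1 + 1) * (y2 - y1 + 1)
--
-- def edge_cuts_rectangle(rect, edge_rect):
--     (x1, y1), (x2, y2) = rect  # box
--     (p, q), (r, s) = edge_rect  # edge box
--
--     # the edge is completely left/right/above/below, it doesn't cut it.
--     return (
--         p < x2
--         and r > x1  # overlaps in x
--         and q < y2
--         and s > y1
--     )  # overlaps in y
--
-- def solve(points):
--     edge_boxes = build_edge_boxes(points)
--
--     max_inside = 0  # max rectangle with no edges cutting through
--
--     # all rectangles from pairs of vertices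
--     for p1, p2 in combinations(points, 2):
--         rect = normalize_rect(p1, p2)
--         area = rect_area_inclusive(rect)
--
--         # only consider if it could beat current best
--         if area > max_inside:
--             # ceck every edge, if any edge cuts the interior not good box
--             for edge_rect in edge_boxes:
--                 if edge_cuts_rectangle(rect, edge_rect):
--                     break
--             else:
--                 # no edge cut this rectangle so its  valid
--                 max_inside = area
--
--     return max_inside
-- ===== SOURCE B (Python) =====
-- from itertools import combinations
--
-- def solve(points):
--     nxt = points[1:] + points[:1]
--     edges = [((min(ax, bx), min(ay, by)), (max(ax, bx), max(ay, by)))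
--              for (ax, ay), (bx, by) in zip(points, nxt)]
--
--     cands = []
--     for (x1, y1), (x2, y2) in combinations(points, 2):
--         l, r = min(x1, x2), max(x1, x2)
--         b, t = min(y1, y2), max(y1, y2)
--         cands.append(((r - l + 1) * (t - b + 1), ((l, b), (r, t))))
--     cands.sort(key=lambda c: c[0], reverse=True)
--
--     for area, ((x1, y1), (x2, y2)) in cands:
--         ok = True
--         for (p, q), (r, s) in edges:
--             if p < x2 and r > x1 and q < y2 and s > y1:
--                 ok = False
--                 break
--         if ok:
--             return area
--     return 0
-- ===== Notes on version B (the rewrite author's own statement) =====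
-- stated objective: alternative
-- what changed: A keeps a running maximum with an area>max pruning guard over the vertex pairs; B materialises all candidate rectangles with their areas, sorts them by area descending, and returns the area of the first candidate no edge box cuts (0 if none); B also builds the edge boxes by zipping the list with its rotation instead of pairwise over an appended closing point.
-- crash fix: On an empty points list A raises IndexError (points[0] while closing the polygon loop); B returns 0. — e.g. on solve([]): A raises IndexError, B returns 0
import Mathlib
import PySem

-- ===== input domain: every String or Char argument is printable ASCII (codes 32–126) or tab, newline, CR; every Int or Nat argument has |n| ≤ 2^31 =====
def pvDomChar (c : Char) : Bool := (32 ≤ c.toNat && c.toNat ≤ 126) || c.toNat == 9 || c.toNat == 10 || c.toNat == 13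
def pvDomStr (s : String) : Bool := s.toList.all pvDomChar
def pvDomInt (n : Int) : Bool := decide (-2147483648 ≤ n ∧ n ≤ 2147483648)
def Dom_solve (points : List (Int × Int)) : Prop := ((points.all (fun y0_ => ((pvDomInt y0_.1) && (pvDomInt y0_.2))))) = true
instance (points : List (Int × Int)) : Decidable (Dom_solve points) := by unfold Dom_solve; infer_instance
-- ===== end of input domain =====

-- B replaces A's running-max-with-pruning by sort-candidates-by-area-descending then first-valid scan (alternative decomposition, same result).


-- ===== PORT A =====
-- shared small helpers (both Pythons compute these same expressions)
def normRect (p1 p2 : Int × Int) : (Int × Int) × (Int × Int) :=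
  ((min p1.1 p2.1, min p1.2 p2.2), (max p1.1 p2.1, max p1.2 p2.2))

def rectArea (r : (Int × Int) × (Int × Int)) : Int :=
  (r.2.1 - r.1.1 + 1) * (r.2.2 - r.1.2 + 1)

def edgeCuts (rect edge : (Int × Int) × (Int × Int)) : Bool :=
  decide (edge.1.1 < rect.2.1) && decide (edge.2.1 > rect.1.1) &&
  decide (edge.1.2 < rect.2.2) && decide (edge.2.2 > rect.1.2)

-- itertools.pairwise
def pairwiseList {α : Type} : List α → List (α × α)
  | [] => []
  | [_] => []
  | a :: b :: t => (a, b) :: pairwiseList (b :: t)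

-- itertools.combinations(_, 2)
def combs2 {α : Type} : List α → List (α × α)
  | [] => []
  | x :: xs => xs.map (fun y => (x, y)) ++ combs2 xs

-- A: loop = points + [points[0]] (points[0] raises on [], excluded by Pre_; headD default unreachable there)
def buildEdgeBoxes (points : List (Int × Int)) : List ((Int × Int) × (Int × Int)) :=
  (pairwiseList (points ++ [points.headD (0, 0)])).map (fun e => normRect e.1 e.2)

def solve (points : List (Int × Int)) : Int :=
  let edges := buildEdgeBoxes points
  (combs2 points).foldl
    (fun m pq =>
      let rect := normRect pq.1 pq.2
      let area := rectArea rect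
      if area > m then
        (if edges.all (fun e => ! edgeCuts rect e) then area else m)
      else m) 0

-- ===== PORT B =====
-- first loop of B: scan the sorted candidates, return the first uncut one's area
def firstValid (edges : List ((Int × Int) × (Int × Int))) :
    List (Int × ((Int × Int) × (Int × Int))) → Int
  | [] => 0
  | c :: t => if edges.all (fun e => ! edgeCuts c.2 e) then c.1 else firstValid edges t

def solve_alt (points : List (Int × Int)) : Int :=
  let nxt := points.drop 1 ++ points.take 1
  let edges := (points.zip nxt).map (fun e => normRect e.1 e.2)
  let cands := (combs2 points).map (fun pq =>
    let rect := normRect pq.1 pq.2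
    (rectArea rect, rect))
  let s := PySem.List.sorted cands (fun c => c.1) true
  firstValid edges s

-- ===== PRECONDITION & SPEC =====
-- Pre_ excludes only the empty list, on which A raises IndexError (points[0]).
def Pre_solve (points : List (Int × Int)) : Prop := points ≠ []
instance (points : List (Int × Int)) : Decidable (Pre_solve points) := by unfold Pre_solve; infer_instance
def pvWitness_solve : (List (Int × Int)) := [(0, 0), (5, 0), (5, 5), (0, 5)]

-- On an empty points list A raises IndexError (points[0] while closing the polygon loop); B returns 0.
def Raises_solve (points : List (Int × Int)) : Prop := points = []
instance (points : List (Int × Int)) : Decidable (Raises_solve points) := by unfold Raises_solve; infer_instance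
def pvRaiseWitness_solve : (List (Int × Int)) := []
def pvRaiseWitnessOut_solve : Int := 0

def Spec_solve (points : List (Int × Int)) (out : Int) : Prop := out = solve_alt points
instance (points : List (Int × Int)) (out : Int) : Decidable (Spec_solve points out) := by unfold Spec_solve; infer_instance

-- ===== CLAIM (what is proved, stated in full; the proofs are below) =====
def Claim_equal_solve : Prop := ∀ (points : List (Int × Int)), Dom_solve points → Pre_solve points → Spec_solve points (solve points)
def Claim_raises_solve : Prop := (∀ (points : List (Int × Int)), Dom_solve points → Raises_solve points → ¬ Pre_solve points) ∧ (Dom_solve (pvRaiseWitness_solve) ∧ Raises_solve (pvRaiseWitness_solve) ∧ solve_alt (pvRaiseWitness_solve) = pvRaiseWitnessOut_solve)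

-- ===== LEMMAS AND PROOFS =====

-- the closing-the-loop edge lists coincide on a nonempty list
theorem pairwise_eq_zip {α : Type} (xs : List α) (x0 : α) :
    pairwiseList (xs ++ [x0]) = xs.zip (xs.drop 1 ++ [x0]) := by
  induction xs with
  | nil => simp [pairwiseList]
  | cons a t ih =>
    cases t with
    | nil => simp [pairwiseList]
    | cons b t' =>
      simp only [List.cons_append, pairwiseList, List.zip_cons_cons, List.drop_succ_cons,
        List.drop_zero] at ih ⊢
      rw [ih]

theorem area_pos (p q : Int × Int) : 0 < rectArea (normRect p q) := by
  have h1 : 0 < max p.1 q.1 - min p.1 q.1 + 1 := by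
    rcases le_total p.1 q.1 with h | h <;> simp [h] <;> omega
  have h2 : 0 < max p.2 q.2 - min p.2 q.2 + 1 := by
    rcases le_total p.2 q.2 with h | h <;> simp [h] <;> omega
  exact mul_pos h1 h2

-- A's step equals "max when valid, skip when cut"
theorem foldl_prune_eq_filter_max (edges : List ((Int × Int) × (Int × Int)))
    (L : List (Int × ((Int × Int) × (Int × Int)))) (m : Int) :
    L.foldl (fun m c => if c.1 > m then (if edges.all (fun e => ! edgeCuts c.2 e) then c.1 else m) else m) m
      = ((L.filter (fun c => edges.all (fun e => ! edgeCuts c.2 e))).map (·.1)).foldl max m := by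
  induction L generalizing m with
  | nil => rfl
  | cons c t ih =>
    simp only [List.foldl_cons, List.filter_cons]
    by_cases hok : edges.all (fun e => ! edgeCuts c.2 e) = true
    · by_cases hgt : c.1 > m
      · simp [hok, hgt, max_eq_right (le_of_lt hgt), ih]
      · simp only [hok, if_pos rfl] at *
        simp [hgt, ih, max_eq_left (by omega : c.1 ≤ m)]
    · simp [hok, ih]

theorem foldl_max_le (xs : List Int) (m : Int) : m ≤ xs.foldl max m := by
  induction xs generalizing m with
  | nil => simp
  | cons a t ih => exact le_trans (le_max_left m a) (by simpa using ih (max m a))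

theorem foldl_max_ub (xs : List Int) (m a : Int)
    (hub : ∀ x ∈ xs, x ≤ a) (hm : m ≤ a) : xs.foldl max m ≤ a := by
  induction xs generalizing m with
  | nil => simpa using hm
  | cons b t ih =>
    simp only [List.foldl_cons]
    exact ih (max m b) (fun x hx => hub x (List.mem_cons_of_mem _ hx))
      (max_le hm (hub b List.mem_cons_self))

theorem foldl_max_mem_le (xs : List Int) (m a : Int) (hmem : a ∈ xs) :
    a ≤ xs.foldl max m := by
  induction xs generalizing m with
  | nil => cases hmem
  | cons b t ih =>
    simp only [List.foldl_cons]
    rcases List.mem_cons.mp hmem with rfl | h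
    · exact le_trans (le_max_right m a) (foldl_max_le t (max m a))
    · exact ih (max m b) h

theorem foldl_max_eq (xs : List Int) (m a : Int)
    (hmem : a ∈ xs) (hub : ∀ x ∈ xs, x ≤ a) (hm : m ≤ a) : xs.foldl max m = a :=
  le_antisymm (foldl_max_ub xs m a hub hm) (foldl_max_mem_le xs m a hmem)

theorem firstValid_none (edges : List ((Int × Int) × (Int × Int)))
    (s : List (Int × ((Int × Int) × (Int × Int))))
    (h : ∀ c ∈ s, edges.all (fun e => ! edgeCuts c.2 e) = false) :
    firstValid edges s = 0 := by
  induction s with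
  | nil => rfl
  | cons c t ih =>
    simp [firstValid, h c List.mem_cons_self, ih (fun x hx => h x (List.mem_cons_of_mem _ hx))]

theorem firstValid_found (edges : List ((Int × Int) × (Int × Int)))
    (s : List (Int × ((Int × Int) × (Int × Int))))
    (hpair : s.Pairwise (fun a b => b.1 ≤ a.1))
    (hex : ∃ c ∈ s, edges.all (fun e => ! edgeCuts c.2 e) = true) :
    ∃ c₀ ∈ s, edges.all (fun e => ! edgeCuts c₀.2 e) = true ∧ firstValid edges s = c₀.1 ∧
      ∀ c ∈ s, edges.all (fun e => ! edgeCuts c.2 e) = true → c.1 ≤ c₀.1 := by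
  induction s with
  | nil => rcases hex with ⟨c, hc, _⟩; cases hc
  | cons a t ih =>
    rcases List.pairwise_cons.mp hpair with ⟨hhead, htail⟩
    by_cases hok : edges.all (fun e => ! edgeCuts a.2 e) = true
    · refine ⟨a, List.mem_cons_self, hok, by simp [firstValid, hok], ?_⟩
      intro c hc _
      rcases List.mem_cons.mp hc with rfl | hc'
      · exact le_refl _
      · exact hhead c hc'
    · have hex' : ∃ c ∈ t, edges.all (fun e => ! edgeCuts c.2 e) = true := by
        rcases hex with ⟨c, hc, hcv⟩
        rcases List.mem_cons.mp hc with rfl | hc'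
        · exact absurd hcv hok
        · exact ⟨c, hc', hcv⟩
      rcases ih htail hex' with ⟨c₀, hc₀, hv, hfv, hub⟩
      refine ⟨c₀, List.mem_cons_of_mem _ hc₀, hv, by simp [firstValid, hok, hfv], ?_⟩
      intro c hc hcv
      rcases List.mem_cons.mp hc with rfl | hc'
      · exact absurd hcv hok
      · exact hub c hc' hcv

-- A's fold over vertex pairs, re-read as a fold over (area, rect) candidates
theorem foldA_eq_foldCands (edges : List ((Int × Int) × (Int × Int)))
    (L : List ((Int × Int) × (Int × Int))) :
    L.foldl (fun m pq =>
        let rect := normRect pq.1 pq.2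
        let area := rectArea rect
        if area > m then (if edges.all (fun e => ! edgeCuts rect e) then area else m) else m) 0
      = (L.map (fun pq =>
            let rect := normRect pq.1 pq.2
            (rectArea rect, rect))).foldl
          (fun m c => if c.1 > m then (if edges.all (fun e => ! edgeCuts c.2 e) then c.1 else m) else m) 0 := by
  rw [List.foldl_map]

-- sorted-then-first-valid equals pruned running max (the heart of the equivalence)
theorem prune_eq_sorted_scan (edges : List ((Int × Int) × (Int × Int)))
    (cands : List (Int × ((Int × Int) × (Int × Int))))
    (hpos : ∀ c ∈ cands, (0:Int) < c.1) :
    cands.foldl (fun m c => if c.1 > m then (if edges.all (fun e => ! edgeCuts c.2 e) then c.1 else m) else m) 0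
      = firstValid edges (PySem.List.sorted cands (fun c => c.1) true) := by
  have hperm : (PySem.List.sorted cands (fun c => c.1) true).Perm cands :=
    PySem.List.sorted_perm ..
  have hpair : (PySem.List.sorted cands (fun c => c.1) true).Pairwise (fun a b => b.1 ≤ a.1) :=
    PySem.List.sorted_pairwise_rev ..
  rw [foldl_prune_eq_filter_max]
  by_cases hex : ∃ c ∈ cands, edges.all (fun e => ! edgeCuts c.2 e) = true
  · have hex' : ∃ c ∈ PySem.List.sorted cands (fun c => c.1) true,
        edges.all (fun e => ! edgeCuts c.2 e) = true := by
      rcases hex with ⟨c, hc, hv⟩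
      exact ⟨c, hperm.mem_iff.mpr hc, hv⟩
    rcases firstValid_found edges _ hpair hex' with ⟨c₀, hc₀, hv, hfv, hub⟩
    rw [hfv]
    have hc₀c : c₀ ∈ cands := hperm.mem_iff.mp hc₀
    apply foldl_max_eq
    · exact List.mem_map.mpr ⟨c₀, List.mem_filter.mpr ⟨hc₀c, hv⟩, rfl⟩
    · intro x hx
      rcases List.mem_map.mp hx with ⟨c, hcf, rfl⟩
      rcases List.mem_filter.mp hcf with ⟨hc, hcv⟩
      exact hub c (hperm.mem_iff.mpr hc) hcv
    · exact le_of_lt (hpos c₀ hc₀c)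
  · have hfilter : cands.filter (fun c => edges.all (fun e => ! edgeCuts c.2 e)) = [] := by
      refine List.filter_eq_nil_iff.mpr ?_
      intro c hc hv
      exact hex ⟨c, hc, by simpa using hv⟩
    rw [hfilter]
    simp only [List.map_nil, List.foldl_nil]
    refine (firstValid_none edges _ ?_).symm
    intro c hc
    by_contra h
    exact hex ⟨c, hperm.mem_iff.mp hc, by simpa using h⟩

-- ===== VERDICT (by name: the statement is the Claim_ definition above) =====
theorem solve_spec : Claim_equal_solve := by
  intro points _ hpre
  unfold Spec_solve solve solve_alt buildEdgeBoxes
  cases points with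
  | nil => exact absurd rfl hpre
  | cons p rest =>
    have hedges : pairwiseList ((p :: rest) ++ [(p :: rest).headD (0, 0)])
        = (p :: rest).zip ((p :: rest).drop 1 ++ (p :: rest).take 1) := by
      simpa using pairwise_eq_zip (p :: rest) p
    rw [hedges, foldA_eq_foldCands]
    apply prune_eq_sorted_scan
    intro c hc
    rcases List.mem_map.mp hc with ⟨pq, _, rfl⟩
    exact area_pos pq.1 pq.2

@[simp] theorem solve_raises : Claim_raises_solve := by
  unfold Claim_raises_solve
  exact ⟨fun points _ hr hp => hp hr, by decide⟩
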